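-- pv_equiv track=rewrite | github.com/86HenriqueSilva/Loteria_Analyzer | 01.gerador_de_milhar.py | encontrar_grupo_animal
-- ===== SOURCE A (Python) =====
-- def encontrar_grupo_animal(numero):
--     tabela_grupos = {
--         "01": {"grupo": "AVESTRUZ", "dezenas": ["01", "02", "03", "04"]},
--         "02": {"grupo": "ÁGUIA", "dezenas": ["05", "06", "07", "08"]},
--         "03": {"grupo": "BURRO", "dezenas": ["09", "10", "11", "12"]},
--         "04": {"grupo": "BORBOLETA", "dezenas": ["13", "14", "15", "16"]},
--         "05": {"grupo": "CACHORRO", "dezenas": ["17", "18", "19", "20"]},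
--         "06": {"grupo": "CABRA", "dezenas": ["21", "22", "23", "24"]},
--         "07": {"grupo": "CARNEIRO", "dezenas": ["25", "26", "27", "28"]},
--         "08": {"grupo": "CAMELO", "dezenas": ["29", "30", "31", "32"]},
--         "09": {"grupo": "COBRA", "dezenas": ["33", "34", "35", "36"]},
--         "10": {"grupo": "COELHO", "dezenas": ["37", "38", "39", "40"]},
--         "11": {"grupo": "CAVALO", "dezenas": ["41", "42", "43", "44"]},
--         "12": {"grupo": "ELEFANTE", "dezenas": ["45", "46", "47", "48"]},
--         "13": {"grupo": "GALO", "dezenas": ["49", "50", "51", "52"]},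
--         "14": {"grupo": "GATO", "dezenas": ["53", "54", "55", "56"]},
--         "15": {"grupo": "JACARÉ", "dezenas": ["57", "58", "59", "60"]},
--         "16": {"grupo": "LEÃO", "dezenas": ["61", "62", "63", "64"]},
--         "17": {"grupo": "MACACO", "dezenas": ["65", "66", "67", "68"]},
--         "18": {"grupo": "PORCO", "dezenas": ["69", "70", "71", "72"]},
--         "19": {"grupo": "PAVÃO", "dezenas": ["73", "74", "75", "76"]},
--         "20": {"grupo": "PERU", "dezenas": ["77", "78", "79", "80"]},
--         "21": {"grupo": "TOURO", "dezenas": ["81", "82", "83", "84"]},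
--         "22": {"grupo": "TIGRE", "dezenas": ["85", "86", "87", "88"]},
--         "23": {"grupo": "URSO", "dezenas": ["89", "90", "91", "92"]},
--         "24": {"grupo": "VEADO", "dezenas": ["93", "94", "95", "96"]},
--         "25": {"grupo": "VACA", "dezenas": ["97", "98", "99", "00"]}
--     }
--
--     dezena = numero[-2:]
--     for grupo, info in tabela_grupos.items():
--         if dezena in info["dezenas"]:
--             return f"Grupo {grupo} - {info['grupo']} ({dezena})"
--
--     return "Nenhum grupo encontrado para o número de dezena fornecido."
-- ===== SOURCE B (Python) =====
-- def encontrar_grupo_animal(numero):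
--     dezena = numero[-2:]
--     if len(dezena) == 2 and all('0' <= c <= '9' for c in dezena):
--         v = 10 * (ord(dezena[0]) - 48) + (ord(dezena[1]) - 48)
--         grupo = 25 if v == 0 else (v - 1) // 4 + 1
--         nomes = ["AVESTRUZ", "ÁGUIA", "BURRO", "BORBOLETA", "CACHORRO",
--                  "CABRA", "CARNEIRO", "CAMELO", "COBRA", "COELHO",
--                  "CAVALO", "ELEFANTE", "GALO", "GATO", "JACARÉ",
--                  "LEÃO", "MACACO", "PORCO", "PAVÃO", "PERU",
--                  "TOURO", "TIGRE", "URSO", "VEADO", "VACA"]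
--         return f"Grupo {str(grupo).zfill(2)} - {nomes[grupo - 1]} ({dezena})"
--     return "Nenhum grupo encontrado para o número de dezena fornecido."
-- ===== Notes on version B (the rewrite author's own statement) =====
-- stated objective: simpler
-- what changed: Replaces the linear scan of the 25-entry group table by a closed-form arithmetic map (v -> 25 if v==0 else (v-1)//4+1) applied after a strict two-ASCII-digit check, with the animal name read from a flat 25-element list.
import Mathlib
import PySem

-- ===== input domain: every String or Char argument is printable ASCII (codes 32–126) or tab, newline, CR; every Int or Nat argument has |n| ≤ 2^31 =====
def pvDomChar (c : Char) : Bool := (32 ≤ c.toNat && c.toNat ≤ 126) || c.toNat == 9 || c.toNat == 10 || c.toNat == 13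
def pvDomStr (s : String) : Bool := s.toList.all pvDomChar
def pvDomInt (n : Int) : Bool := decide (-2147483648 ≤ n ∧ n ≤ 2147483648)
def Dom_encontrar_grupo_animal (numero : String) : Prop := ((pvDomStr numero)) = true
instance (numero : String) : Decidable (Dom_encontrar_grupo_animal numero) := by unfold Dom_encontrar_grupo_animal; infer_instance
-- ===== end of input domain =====

-- B replaces A's linear scan of the 25-group table by a closed-form arithmetic map
-- from the numeric value of the last two digits to the group index (objective: simpler).

-- ===== PORT A =====
-- A's dict literal: key, animal name, list of dezenas (dezenas kept as List Char for code-point-exact comparison).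
def pvTabelaA : List (String × String × List (List Char)) :=
  [ ("01", "AVESTRUZ", [['0','1'],['0','2'],['0','3'],['0','4']]),
    ("02", "ÁGUIA", [['0','5'],['0','6'],['0','7'],['0','8']]),
    ("03", "BURRO", [['0','9'],['1','0'],['1','1'],['1','2']]),
    ("04", "BORBOLETA", [['1','3'],['1','4'],['1','5'],['1','6']]),
    ("05", "CACHORRO", [['1','7'],['1','8'],['1','9'],['2','0']]),
    ("06", "CABRA", [['2','1'],['2','2'],['2','3'],['2','4']]),
    ("07", "CARNEIRO", [['2','5'],['2','6'],['2','7'],['2','8']]),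
    ("08", "CAMELO", [['2','9'],['3','0'],['3','1'],['3','2']]),
    ("09", "COBRA", [['3','3'],['3','4'],['3','5'],['3','6']]),
    ("10", "COELHO", [['3','7'],['3','8'],['3','9'],['4','0']]),
    ("11", "CAVALO", [['4','1'],['4','2'],['4','3'],['4','4']]),
    ("12", "ELEFANTE", [['4','5'],['4','6'],['4','7'],['4','8']]),
    ("13", "GALO", [['4','9'],['5','0'],['5','1'],['5','2']]),
    ("14", "GATO", [['5','3'],['5','4'],['5','5'],['5','6']]),
    ("15", "JACARÉ", [['5','7'],['5','8'],['5','9'],['6','0']]),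
    ("16", "LEÃO", [['6','1'],['6','2'],['6','3'],['6','4']]),
    ("17", "MACACO", [['6','5'],['6','6'],['6','7'],['6','8']]),
    ("18", "PORCO", [['6','9'],['7','0'],['7','1'],['7','2']]),
    ("19", "PAVÃO", [['7','3'],['7','4'],['7','5'],['7','6']]),
    ("20", "PERU", [['7','7'],['7','8'],['7','9'],['8','0']]),
    ("21", "TOURO", [['8','1'],['8','2'],['8','3'],['8','4']]),
    ("22", "TIGRE", [['8','5'],['8','6'],['8','7'],['8','8']]),
    ("23", "URSO", [['8','9'],['9','0'],['9','1'],['9','2']]),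
    ("24", "VEADO", [['9','3'],['9','4'],['9','5'],['9','6']]),
    ("25", "VACA", [['9','7'],['9','8'],['9','9'],['0','0']]) ]

-- A's `for grupo, info in tabela_grupos.items(): if dezena in info["dezenas"]: return …`
def pvScanA (dz : List Char) : List (String × String × List (List Char)) → String
  | [] => "Nenhum grupo encontrado para o número de dezena fornecido."
  | (g, nome, dzs) :: rest =>
      if dz ∈ dzs then "Grupo " ++ g ++ " - " ++ nome ++ " (" ++ String.ofList dz ++ ")"
      else pvScanA dz rest

def encontrar_grupo_animal (numero : String) : String :=
  let dezena := PySem.List.slice numero.toList (some (-2)) none   -- numero[-2:]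
  pvScanA dezena pvTabelaA

-- ===== PORT B =====
def pvNomesB : List String :=
  ["AVESTRUZ", "ÁGUIA", "BURRO", "BORBOLETA", "CACHORRO",
   "CABRA", "CARNEIRO", "CAMELO", "COBRA", "COELHO",
   "CAVALO", "ELEFANTE", "GALO", "GATO", "JACARÉ",
   "LEÃO", "MACACO", "PORCO", "PAVÃO", "PERU",
   "TOURO", "TIGRE", "URSO", "VEADO", "VACA"]

-- Source B's `len(dezena) == 2 and all('0' <= c <= '9' for c in dezena)` then the arithmetic map.
def pvCoreB (dz : List Char) : String :=
  match dz with
  | [c1, c2] =>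
      if ('0' ≤ c1 && c1 ≤ '9') && ('0' ≤ c2 && c2 ≤ '9') then
        let v : Nat := 10 * (c1.toNat - 48) + (c2.toNat - 48)
        let grupo : Nat := if v = 0 then 25 else (v - 1) / 4 + 1
        "Grupo " ++ PySem.Str.zfill (PySem.Int.toStr (grupo : Int)) 2 ++ " - " ++
          pvNomesB.getD (grupo - 1) "" ++ " (" ++ String.ofList dz ++ ")"
      else "Nenhum grupo encontrado para o número de dezena fornecido."
  | _ => "Nenhum grupo encontrado para o número de dezena fornecido."

def encontrar_grupo_animal_alt (numero : String) : String :=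
  let dezena := PySem.List.slice numero.toList (some (-2)) none   -- numero[-2:]
  pvCoreB dezena

-- ===== PRECONDITION & SPEC =====
def Spec_encontrar_grupo_animal (numero : String) (out : String) : Prop := out = encontrar_grupo_animal_alt numero
instance (numero : String) (out : String) : Decidable (Spec_encontrar_grupo_animal numero out) := by unfold Spec_encontrar_grupo_animal; infer_instance

-- ===== CLAIM (what is proved, stated in full; the proofs are below) =====
def Claim_equal_encontrar_grupo_animal : Prop := ∀ (numero : String), Dom_encontrar_grupo_animal numero → Spec_encontrar_grupo_animal numero (encontrar_grupo_animal numero)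

-- ===== LEMMAS AND PROOFS =====

-- dz is exactly two ASCII digits?
def pvTwoDigits (dz : List Char) : Bool :=
  match dz with
  | [c1, c2] => ('0' ≤ c1 && c1 ≤ '9') && ('0' ≤ c2 && c2 ≤ '9')
  | _ => false

-- the scan returns the fallback when dz is not a two-digit string, for ANY table whose dezenas all are
lemma pvScan_fallback_gen (dz : List Char) (h : pvTwoDigits dz = false) :
    ∀ t : List (String × String × List (List Char)),
      (∀ e ∈ t, ∀ m ∈ e.2.2, pvTwoDigits m = true) →
      pvScanA dz t = "Nenhum grupo encontrado para o número de dezena fornecido." := by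
  intro t ht
  induction t with
  | nil => rfl
  | cons e rest ih =>
      obtain ⟨g, nome, dzs⟩ := e
      simp only [pvScanA]
      rw [if_neg, ih (fun e he => ht e (List.mem_cons_of_mem _ he))]
      intro hmem
      have : pvTwoDigits dz = true := ht _ (List.mem_cons_self) dz hmem
      rw [h] at this; cases this

lemma pvScanA_fallback (dz : List Char) (h : pvTwoDigits dz = false) :
    pvScanA dz pvTabelaA = "Nenhum grupo encontrado para o número de dezena fornecido." :=
  pvScan_fallback_gen dz h pvTabelaA (by decide)

lemma pvCoreB_fallback (dz : List Char) (h : pvTwoDigits dz = false) :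
    pvCoreB dz = "Nenhum grupo encontrado para o número de dezena fornecido." := by
  match dz with
  | [] => rfl
  | [_] => rfl
  | _ :: _ :: _ :: _ => rfl
  | [c1, c2] =>
      simp only [pvTwoDigits] at h
      simp [pvCoreB, h]

lemma pv_digit_cases (dz : List Char) (h : pvTwoDigits dz = true) :
    ∃ d1 d2 : Nat, d1 < 10 ∧ d2 < 10 ∧ dz = [Char.ofNat (48 + d1), Char.ofNat (48 + d2)] := by
  match dz, h with
  | [c1, c2], h =>
    simp only [pvTwoDigits, Bool.and_eq_true, decide_eq_true_eq] at h
    obtain ⟨⟨h1a, h1b⟩, h2a, h2b⟩ := h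
    have l1 : 48 ≤ c1.toNat := Nat.succ_le_of_lt h1a
    have u1 : c1.toNat ≤ 57 := Fin.mk_le_mk.mp h1b
    have l2 : 48 ≤ c2.toNat := Nat.succ_le_of_lt h2a
    have u2 : c2.toNat ≤ 57 := Fin.mk_le_mk.mp h2b
    refine ⟨c1.toNat - 48, c2.toNat - 48, by omega, by omega, ?_⟩
    rw [show 48 + (c1.toNat - 48) = c1.toNat by omega,
        show 48 + (c2.toNat - 48) = c2.toNat by omega,
        Char.ofNat_toNat, Char.ofNat_toNat]

lemma pv_digits_agree : ∀ d1 < 10, ∀ d2 < 10,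
    pvScanA [Char.ofNat (48 + d1), Char.ofNat (48 + d2)] pvTabelaA
      = pvCoreB [Char.ofNat (48 + d1), Char.ofNat (48 + d2)] := by decide

lemma pv_core_agree (dz : List Char) : pvScanA dz pvTabelaA = pvCoreB dz := by
  by_cases h : pvTwoDigits dz = true
  · obtain ⟨d1, d2, hd1, hd2, rfl⟩ := pv_digit_cases dz h
    exact pv_digits_agree d1 hd1 d2 hd2
  · rw [pvScanA_fallback dz (by simpa using h), pvCoreB_fallback dz (by simpa using h)]

-- ===== VERDICT (by name: the statement is the Claim_ definition above) =====
theorem encontrar_grupo_animal_spec : Claim_equal_encontrar_grupo_animal := by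
  intro numero _
  unfold Spec_encontrar_grupo_animal encontrar_grupo_animal encontrar_grupo_animal_alt
  exact pv_core_agree _
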